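-- pv_equiv track=rewrite | github.com/pypi-data/pypi-mirror-332 | packages/EasyCryptographer/easycryptographer-2.2.8.tar.gz/easycryptographer-2.2.8/easy_cryptographer/steganography/pro/hide_to_image.py | binary_to_rgb
-- ===== SOURCE A (Python) =====
-- def binary_to_rgb(binary):
--     rgb_values = []
--     for i in range(0, len(binary), 8):
--         r = int(binary[i:i + 8], 2) if i + 8 <= len(binary) else 0
--         g = int(binary[i + 8:i + 16], 2) if i + 16 <= len(binary) else 0
--         b = int(binary[i + 16:i + 24], 2) if i + 24 <= len(binary) else 0
--         rgb_values.append((r, g, b))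
--     return rgb_values
-- ===== SOURCE B (Python) =====
-- def binary_to_rgb(binary):
--     # Pass 1: one byte value per 8-char chunk (0 for a short final chunk), then pad two zeros.
--     byts = [int(binary[k:k + 8], 2) if k + 8 <= len(binary) else 0
--             for k in range(0, len(binary), 8)]
--     byts += [0, 0]
--     # Pass 2: overlapping sliding windows of 3.
--     return list(zip(byts, byts[1:], byts[2:]))
-- ===== Notes on version B (the rewrite author's own statement) =====
-- stated objective: simpler
-- what changed: A's single loop computes three conditional slice-parses per chunk (so every byte is parsed up to three times); B extracts each byte once in one comprehension, pads two zero bytes, and forms the overlapping triples as zip(byts, byts[1:], byts[2:]).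
import Mathlib
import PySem

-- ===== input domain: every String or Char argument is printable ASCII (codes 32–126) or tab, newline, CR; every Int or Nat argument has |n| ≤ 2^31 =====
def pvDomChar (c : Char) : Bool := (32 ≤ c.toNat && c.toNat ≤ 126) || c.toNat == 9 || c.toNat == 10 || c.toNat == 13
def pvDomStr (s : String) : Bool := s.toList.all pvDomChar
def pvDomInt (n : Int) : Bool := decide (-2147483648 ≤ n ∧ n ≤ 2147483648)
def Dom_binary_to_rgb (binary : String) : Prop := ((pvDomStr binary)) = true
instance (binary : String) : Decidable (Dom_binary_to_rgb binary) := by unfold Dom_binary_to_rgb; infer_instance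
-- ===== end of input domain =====

-- B replaces A's single loop (three conditional slice-parses per iteration) by a byte-extraction
-- pass followed by a zip of three shifted copies (sliding windows of 3); objective: simpler.

-- ===== PORT A =====
-- int(x, 2) is PySem.Int.ofCharsBase? … 2; it is none exactly where Python raises ValueError,
-- and Pre_ excludes those inputs, so the .getD 0 default is never the value used.
def binary_to_rgb (binary : String) : List (Int × Int × Int) :=
  let s := binary.toList
  let n : Int := s.length
  (PySem.List.pyRange 0 n 8).foldl
    (fun rgb_values i =>
      let r : Int := if i + 8 ≤ n then (PySem.Int.ofCharsBase? (PySem.List.slice s (some i) (some (i + 8))) 2).getD 0 else 0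
      let g : Int := if i + 16 ≤ n then (PySem.Int.ofCharsBase? (PySem.List.slice s (some (i + 8)) (some (i + 16))) 2).getD 0 else 0
      let b : Int := if i + 24 ≤ n then (PySem.Int.ofCharsBase? (PySem.List.slice s (some (i + 16)) (some (i + 24))) 2).getD 0 else 0
      rgb_values ++ [(r, g, b)]) []

-- ===== PORT B =====
def binary_to_rgb_alt (binary : String) : List (Int × Int × Int) :=
  let s := binary.toList
  let n : Int := s.length
  let byts : List Int :=
    ((PySem.List.pyRange 0 n 8).map (fun k =>
      if k + 8 ≤ n then (PySem.Int.ofCharsBase? (PySem.List.slice s (some k) (some (k + 8))) 2).getD 0 else 0))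
    ++ [0, 0]
  List.zip byts (List.zip (byts.drop 1) (byts.drop 2))

-- ===== PRECONDITION & SPEC =====
-- Pre_ excludes exactly the inputs on which A raises ValueError: every FULL 8-char chunk (the
-- only substrings A ever passes to int(x, 2)) must be parsable in base 2 (ofCharsBase? is none
-- exactly where int(x, 2) raises).
def Pre_binary_to_rgb (binary : String) : Prop :=
  ∀ j ∈ List.range (binary.toList.length / 8),
    PySem.Int.ofCharsBase? (PySem.List.slice binary.toList (some (8 * (j : Int))) (some (8 * (j : Int) + 8))) 2 ≠ none
instance (binary : String) : Decidable (Pre_binary_to_rgb binary) := by unfold Pre_binary_to_rgb; infer_instance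
def pvWitness_binary_to_rgb : String := "0000000110000000"
def Spec_binary_to_rgb (binary : String) (out : List (Int × Int × Int)) : Prop := out = binary_to_rgb_alt binary
instance (binary : String) (out : List (Int × Int × Int)) : Decidable (Spec_binary_to_rgb binary out) := by unfold Spec_binary_to_rgb; infer_instance

-- ===== CLAIM (what is proved, stated in full; the proofs are below) =====
def Claim_equal_binary_to_rgb : Prop := ∀ (binary : String), Dom_binary_to_rgb binary → Pre_binary_to_rgb binary → Spec_binary_to_rgb binary (binary_to_rgb binary)

-- ===== LEMMAS AND PROOFS =====

-- value of the 8-char chunk starting at k (0 if the chunk is not fully inside s)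
def pvByte (s : List Char) (k : Int) : Int :=
  if k + 8 ≤ (s.length : Int) then (PySem.Int.ofCharsBase? (PySem.List.slice s (some k) (some (k + 8))) 2).getD 0 else 0

theorem zip_window (g : Nat → Int) (m : Nat) (h0 : ∀ j, m ≤ j → g j = 0) :
    List.zip ((List.range m).map g ++ [0,0])
      (List.zip (((List.range m).map g ++ [0,0]).drop 1) (((List.range m).map g ++ [0,0]).drop 2))
    = (List.range m).map (fun j => (g j, g (j+1), g (j+2))) := by
  have hget : ∀ j, (hj : j < m + 2) →
      ((List.range m).map g ++ [0,0])[j]'(by simp; omega) = g j := by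
    intro j hj
    by_cases h : j < m
    · rw [List.getElem_append_left (by simpa using h)]
      simp
    · rw [List.getElem_append_right (by simpa using h)]
      have hz : g j = 0 := h0 j (by omega)
      have h' : j - (List.map g (List.range m)).length = j - m := by simp
      have hjm : j - m = 0 ∨ j - m = 1 := by omega
      rcases hjm with h1 | h1 <;> simp [h1, hz]
  apply List.ext_getElem
  · simp
  · intro i h1 h2
    simp only [List.getElem_zip, List.getElem_drop, List.getElem_map, List.getElem_range]
    have hi : i < m := by simpa using h2
    rw [hget i (by omega), hget (1+i) (by omega), hget (2+i) (by omega)]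
    simp [Nat.add_comm]

theorem pyRange8 (n : Nat) :
    PySem.List.pyRange 0 (n : Int) 8 = (List.range ((n + 7) / 8)).map (fun k => ((8 * k : Nat) : Int)) := by
  rw [PySem.List.pyRange_of_pos 0 (n : Int) (s := 8) (by norm_num)]
  have hm : (if (0 : Int) < (n : Int) then (((n : Int) - 0 + 8 - 1) / 8).toNat else 0) = (n + 7) / 8 := by
    by_cases h : (0 : Int) < (n : Int)
    · simp only [if_pos h]
      have : ((n : Int) - 0 + 8 - 1) = ((n + 7 : Nat) : Int) := by push_cast; ring
      rw [this]
      omega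
    · have hn : n = 0 := by omega
      simp [hn]
  rw [hm]
  apply List.map_congr_left
  intro k _
  push_cast; ring

theorem pvByte_zero (s : List Char) (j : Nat) (hj : (s.length + 7) / 8 ≤ j) :
    pvByte s ((8 * j : Nat) : Int) = 0 := by
  unfold pvByte
  rw [if_neg]
  push_cast
  omega

-- ===== VERDICT (by name: the statement is the Claim_ definition above) =====
theorem binary_to_rgb_spec : Claim_equal_binary_to_rgb := by
  intro binary _ _
  unfold Spec_binary_to_rgb
  simp only [binary_to_rgb, binary_to_rgb_alt]
  set s := binary.toList with hs
  set m := (s.length + 7) / 8 with hm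
  have hfun : (fun (rgb_values : List (Int × Int × Int)) (i : Int) =>
      rgb_values ++ [((if i + 8 ≤ (s.length : Int) then (PySem.Int.ofCharsBase? (PySem.List.slice s (some i) (some (i + 8))) 2).getD 0 else 0),
        (if i + 16 ≤ (s.length : Int) then (PySem.Int.ofCharsBase? (PySem.List.slice s (some (i + 8)) (some (i + 16))) 2).getD 0 else 0),
        (if i + 24 ≤ (s.length : Int) then (PySem.Int.ofCharsBase? (PySem.List.slice s (some (i + 16)) (some (i + 24))) 2).getD 0 else 0))])
      = fun acc i => acc ++ [(pvByte s i, pvByte s (i + 8), pvByte s (i + 16))] := by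
    funext acc i
    unfold pvByte
    rw [show i + 8 + 8 = i + 16 from by ring, show i + 16 + 8 = i + 24 from by ring]
  have hbfun : (fun (k : Int) =>
      if k + 8 ≤ (s.length : Int) then (PySem.Int.ofCharsBase? (PySem.List.slice s (some k) (some (k + 8))) 2).getD 0 else 0)
      = pvByte s := by
    funext k; rfl
  rw [hfun, hbfun]
  rw [PySem.List.foldl_append_singleton_eq_map
        (fun i => (pvByte s i, pvByte s (i + 8), pvByte s (i + 16))), List.nil_append]
  rw [pyRange8, List.map_map, List.map_map]
  set g : Nat → Int := fun j => pvByte s ((8 * j : Nat) : Int) with hg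
  have h0 : ∀ j, m ≤ j → g j = 0 := fun j hj => pvByte_zero s j hj
  have hA : (List.range m).map ((fun i => (pvByte s i, pvByte s (i + 8), pvByte s (i + 16))) ∘ fun k => ((8 * k : Nat) : Int))
      = (List.range m).map (fun j => (g j, g (j + 1), g (j + 2))) := by
    apply List.map_congr_left
    intro j _
    simp only [Function.comp, hg]
    have e1 : ((8 * j : Nat) : Int) + 8 = ((8 * (j + 1) : Nat) : Int) := by push_cast; ring
    have e2 : ((8 * j : Nat) : Int) + 16 = ((8 * (j + 2) : Nat) : Int) := by push_cast; ring
    rw [e1, e2]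
  have hB : (List.range m).map (pvByte s ∘ fun k => ((8 * k : Nat) : Int)) = (List.range m).map g := by
    apply List.map_congr_left
    intro j _
    simp only [Function.comp, hg]
  rw [hA, hB, zip_window g m h0]
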